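-- pv_equiv track=rewrite | github.com/Geckuss/TKT200011 | Viikko-4/sublists.py | count
-- ===== SOURCE A (Python) =====
-- def count(t):
--     sums = {0: [-1]}
--     total = curr_sum = 0
--     for i, num in enumerate(t):
--         curr_sum += num
--         if curr_sum not in sums:
--             sums[curr_sum] = []
--         for j in sums[curr_sum]:
--             if t[j] == num and j < i:
--                 total += 1
--         sums[curr_sum].append(i)
--     return total
-- ===== SOURCE B (Python) =====
-- def count(t):
--     total = 0
--     s = 0
--     table = {}
--     for x in t:
--         s += x
--         c = table.get(s, {})
--         total += c.get(x, 0)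
--         c[x] = c.get(x, 0) + 1
--         table[s] = c
--     return total
-- ===== Notes on version B (the rewrite author's own statement) =====
-- stated objective: alternative
-- what changed: B replaces A's inner scan over the list of all previous indices with the same prefix sum by a per-prefix-sum value-counter dictionary (add the current count of the value, then increment it), and drops A's sentinel index minus-one, whose negative-index lookup accidentally compares against the last element; same measured speed on the generated inputs.
-- intended difference: On lists where some prefix t[0..i] sums to 0 and t[i] equals the last element, A's sentinel index minus-one stored under prefix sum 0 makes the comparison t[j]==num read the LAST element via Python's negative indexing, so A over-counts by one per such position (e.g. A([0]) = 1); B counts only real index pairs j < i, which is the intended meaning of the sentinel for the empty prefix. — e.g. on count([0]): A returns 1, B returns 0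
import Mathlib
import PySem

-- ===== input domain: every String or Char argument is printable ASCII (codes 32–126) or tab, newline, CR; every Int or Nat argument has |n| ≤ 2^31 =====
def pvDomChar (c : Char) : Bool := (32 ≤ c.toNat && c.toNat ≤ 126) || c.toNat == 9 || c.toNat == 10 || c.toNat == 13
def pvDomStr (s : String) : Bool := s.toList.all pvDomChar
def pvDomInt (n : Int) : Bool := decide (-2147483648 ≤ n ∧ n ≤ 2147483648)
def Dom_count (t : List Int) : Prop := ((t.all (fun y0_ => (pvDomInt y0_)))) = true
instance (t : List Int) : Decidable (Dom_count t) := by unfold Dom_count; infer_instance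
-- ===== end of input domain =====

-- B replaces A's per-prefix-sum index lists (inner scan) by per-prefix-sum value counters, and drops
-- A's sentinel index minus-one, whose negative-index lookup over-counts (see D_count).

-- ===== PORT A =====
def countA_loop (t : List Int) : List Int → Nat → PySem.Dict Int (List Int) → Int → Int → Int
  | [], _, _, total, _ => total
  | num :: rest, i, sums, total, cs =>
    let cs' := cs + num
    let sums1 := if sums.contains cs' then sums else sums.insert cs' []
    let total1 := (sums1.getD cs' []).foldl
        (fun tot j => if PySem.List.pyGet? t j == some num ∧ j < (i : Int) then tot + 1 else tot) total
    let sums2 := sums1.modify cs' [] (fun l => l ++ [(i : Int)])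
    countA_loop t rest (i + 1) sums2 total1 cs'

def count (t : List Int) : Int :=
  countA_loop t t 0 ((PySem.Dict.empty).insert 0 [-1]) 0 0

-- ===== PORT B =====
def countB_loop : List Int → PySem.Dict Int (PySem.Dict Int Int) → Int → Int → Int
  | [], _, total, _ => total
  | x :: rest, table, total, s =>
    let s' := s + x
    let c := table.getD s' PySem.Dict.empty
    let total1 := total + c.getD x 0
    let table1 := table.insert s' (c.insert x (c.getD x 0 + 1))
    countB_loop rest table1 total1 s'

def count_alt (t : List Int) : Int := countB_loop t PySem.Dict.empty 0 0

-- ===== PRECONDITION & SPEC =====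
-- On lists where some prefix t[0..i] sums to 0 and t[i] equals the last element, A's sentinel index
-- minus-one makes t[j]==num compare against the LAST element (Python negative indexing) and over-counts
-- by one per such position (A([0]) = 1); B counts only real index pairs j < i, the intended meaning of
-- the sentinel for the empty prefix.
def D_count (t : List Int) : Prop :=
  ∃ i < t.length, (t.take (i + 1)).sum = 0 ∧ t.getD i 0 = t.getD (t.length - 1) 0
instance (t : List Int) : Decidable (D_count t) := by unfold D_count; infer_instance

def Spec_count (t : List Int) (out : Int) : Prop := ¬ D_count t → out = count_alt t
instance (t : List Int) (out : Int) : Decidable (Spec_count t out) := by unfold Spec_count; infer_instance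

def pvDiffWitness_count : List Int := [0]
def pvDiffWitnessOut_count : Int × Int := (1, 0)

-- ===== CLAIM (what is proved, stated in full; the proofs are below) =====
def Claim_unchanged_count : Prop := ∀ (t : List Int), Dom_count t → Spec_count t (count t)
def Claim_changed_count : Prop := Dom_count (pvDiffWitness_count) ∧ D_count (pvDiffWitness_count) ∧ count (pvDiffWitness_count) = pvDiffWitnessOut_count.1 ∧ count_alt (pvDiffWitness_count) = pvDiffWitnessOut_count.2 ∧ pvDiffWitnessOut_count.1 ≠ pvDiffWitnessOut_count.2
def Claim_exact_count : Prop := ∀ (t : List Int), Dom_count t → D_count t → count t ≠ count_alt t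

-- ===== LEMMAS AND PROOFS =====

-- number of matches a value v finds in a list of indices (via Python indexing into t)
def cntL (t : List Int) (l : List Int) (v : Int) : Int :=
  ((l.filter (fun j => PySem.List.pyGet? t j == some v)).length : Int)

-- sentinel over-count of A: positions whose running prefix sum is 0 and whose element equals t[-1]
def Zcnt (t : List Int) : Int → List Int → Int
  | _, [] => 0
  | cs, x :: r =>
    (if cs + x = 0 ∧ PySem.List.pyGet? t (-1) = some x then 1 else 0) + Zcnt t (cs + x) r

theorem cntL_append_singleton (t : List Int) (l : List Int) (j v : Int) :
    cntL t (l ++ [j]) v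
      = cntL t l v + (if PySem.List.pyGet? t j == some v then 1 else 0) := by
  by_cases h : PySem.List.pyGet? t j == some v
  · simp [cntL, List.filter_append, h]
  · simp [cntL, List.filter_append, h]

theorem inner_count (t : List Int) (num : Int) (i : Nat) :
    ∀ (l : List Int) (tot : Int), (∀ j ∈ l, j < (i : Int)) →
      l.foldl (fun tot j => if PySem.List.pyGet? t j == some num ∧ j < (i : Int) then tot + 1 else tot) tot
        = tot + cntL t l num := by
  intro l
  induction l with
  | nil => intro tot _; simp [cntL]
  | cons j l ih =>
    intro tot h
    have hj : j < (i : Int) := h j (by simp)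
    have hrest : ∀ x ∈ l, x < (i : Int) := fun x hx => h x (by simp [hx])
    simp only [List.foldl_cons]
    rw [ih _ hrest]
    by_cases hm : PySem.List.pyGet? t j == some num
    · simp [cntL, hm, hj]
      ring
    · simp [cntL, hm, hj]

theorem Zcnt_nonneg (t : List Int) : ∀ (r : List Int) (cs : Int), 0 ≤ Zcnt t cs r := by
  intro r
  induction r with
  | nil => intro cs; simp [Zcnt]
  | cons x r ih =>
    intro cs
    have := ih (cs + x)
    simp only [Zcnt]
    split <;> omega

-- the coupled simulation invariant between A's state and B's state
theorem loop_eq (t : List Int) :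
    ∀ (r pre : List Int) (sums : PySem.Dict Int (List Int))
      (table : PySem.Dict Int (PySem.Dict Int Int)) (totalA totalB z cs : Int),
      t = pre ++ r →
      (∀ s j, j ∈ sums.getD s [] → j < (pre.length : Int)) →
      (∀ s v, cntL t (sums.getD s []) v
          = (table.getD s PySem.Dict.empty).getD v 0
            + (if s = 0 ∧ PySem.List.pyGet? t (-1) = some v then 1 else 0)) →
      totalA = totalB + z →
      countA_loop t r pre.length sums totalA cs
        = countB_loop r table totalB cs + z + Zcnt t cs r := by
  intro r
  induction r with
  | nil =>
    intro pre sums table totalA totalB z cs _ _ _ htot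
    simp [countA_loop, countB_loop, Zcnt, htot]
  | cons num rest ih =>
    intro pre sums table totalA totalB z cs ht h1 h2 htot
    have hkey : PySem.List.pyGet? t (pre.length : Int) = some num := by
      rw [ht]; exact PySem.List.pyGet?_append_length pre rest num
    -- inserting an empty list for an absent key does not change any getD-with-default-[]
    have hg1 : ∀ s : Int,
        (if sums.contains (cs + num) then sums else sums.insert (cs + num) []).getD s []
          = sums.getD s [] := by
      intro s
      by_cases hc : sums.contains (cs + num)
      · simp [hc]
      · simp only [hc, Bool.false_eq_true, if_false]
        rw [PySem.Dict.getD_insert]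
        by_cases hs : s = cs + num
        · subst hs
          rw [if_pos rfl, PySem.Dict.getD_of_not_contains _ _ (Bool.not_eq_true _ ▸ eq_false_of_ne_true hc)]
        · rw [if_neg hs]
    have hsum2 : ∀ s : Int,
        ((if sums.contains (cs + num) then sums else sums.insert (cs + num) []).modify
            (cs + num) [] (fun l => l ++ [(pre.length : Int)])).getD s []
          = if s = cs + num then sums.getD (cs + num) [] ++ [(pre.length : Int)]
            else sums.getD s [] := by
      intro s
      rw [PySem.Dict.getD_modify]
      by_cases hs : s = cs + num <;> simp [hs, hg1]
    simp only [countA_loop, countB_loop, Zcnt]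
    rw [hg1]
    rw [inner_count t num pre.length _ totalA (fun j hj => h1 _ j hj)]
    have hstep := ih (pre ++ [num])
      ((if sums.contains (cs + num) then sums else sums.insert (cs + num) []).modify
          (cs + num) [] (fun l => l ++ [(pre.length : Int)]))
      ((table.getD (cs + num) PySem.Dict.empty).getD num 0 |> fun _ =>
        table.insert (cs + num)
          (((table.getD (cs + num) PySem.Dict.empty)).insert num
            ((table.getD (cs + num) PySem.Dict.empty).getD num 0 + 1)))
      (totalA + cntL t (sums.getD (cs + num) []) num)
      (totalB + (table.getD (cs + num) PySem.Dict.empty).getD num 0)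
      (z + (if cs + num = 0 ∧ PySem.List.pyGet? t (-1) = some num then 1 else 0))
      (cs + num)
      (by rw [ht, List.append_assoc]; rfl)
      (by
        intro s j hj
        rw [hsum2] at hj
        by_cases hs : s = cs + num
        · rw [if_pos hs] at hj
          rcases List.mem_append.mp hj with hj | hj
          · have := h1 _ j hj
            simp only [List.length_append, List.length_cons, List.length_nil]
            push_cast
            omega
          · simp only [List.mem_singleton] at hj
            subst hj
            simp only [List.length_append, List.length_cons, List.length_nil]
            push_cast
            omega
        · rw [if_neg hs] at hj
          have := h1 _ j hj
          simp only [List.length_append, List.length_cons, List.length_nil]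
          push_cast
          omega)
      (by
        intro s v
        rw [hsum2]
        by_cases hs : s = cs + num
        · subst hs
          rw [if_pos rfl, cntL_append_singleton, h2, PySem.Dict.getD_insert_self, hkey]
          rw [PySem.Dict.getD_insert]
          by_cases hv : v = num
          · subst hv
            simp
            ring
          · have hv' : ((some num : Option Int) == some v) = false := by
              simp only [beq_eq_false_iff_ne, ne_eq, Option.some.injEq]
              exact fun h => hv h.symm
            rw [hv']
            simp [hv]
        · rw [if_neg hs, h2, PySem.Dict.getD_insert_of_ne _ _ _ hs])
      (by
        have hh := h2 (cs + num) num
        rw [hh]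
        linarith)
    rw [List.length_append, List.length_cons, List.length_nil] at hstep
    rw [hstep]
    ring

theorem count_eq_alt_add (t : List Int) : count t = count_alt t + Zcnt t 0 t := by
  have h := loop_eq t t [] ((PySem.Dict.empty).insert 0 [-1]) PySem.Dict.empty 0 0 0 0
    rfl
    (by
      intro s j hj
      rw [PySem.Dict.getD_insert] at hj
      by_cases hs : s = 0
      · rw [if_pos hs] at hj
        simp only [List.mem_singleton] at hj
        subst hj
        simp
      · rw [if_neg hs, PySem.Dict.getD_empty] at hj
        simp at hj)
    (by
      intro s v
      rw [PySem.Dict.getD_insert, PySem.Dict.getD_empty, PySem.Dict.getD_empty]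
      by_cases hs : s = 0
      · rw [if_pos hs]
        by_cases hv : PySem.List.pyGet? t (-1) = some v
        · simp [cntL, List.filter, hv, hs]
        · have hv' : (PySem.List.pyGet? t (-1) == some v) = false := by
            simp only [beq_eq_false_iff_ne, ne_eq]
            exact hv
          simp [cntL, List.filter, hv', hv, hs]
      · rw [if_neg hs]
        simp [cntL, hs])
    rfl
  simpa [count, count_alt] using h

theorem Zcnt_ne_iff (t : List Int) :
    ∀ (r : List Int) (cs : Int),
      Zcnt t cs r ≠ 0 ↔
        ∃ i < r.length, cs + (r.take (i + 1)).sum = 0 ∧ PySem.List.pyGet? t (-1) = some (r.getD i 0) := by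
  intro r
  induction r with
  | nil => intro cs; simp [Zcnt]
  | cons x r ih =>
    intro cs
    have hz := Zcnt_nonneg t r (cs + x)
    have hih := ih (cs + x)
    constructor
    · intro hne
      by_cases hS : cs + x = 0 ∧ PySem.List.pyGet? t (-1) = some x
      · exact ⟨0, by simp, by simpa using hS.1, by simpa using hS.2⟩
      · have : Zcnt t (cs + x) r ≠ 0 := by
          simp only [Zcnt, if_neg hS] at hne
          omega
        obtain ⟨i, hi, hsum, hget⟩ := hih.mp this
        refine ⟨i + 1, by simpa using Nat.succ_lt_succ hi, ?_, ?_⟩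
        · simp only [List.take_succ_cons, List.sum_cons]
          omega
        · simpa using hget
    · rintro ⟨i, hi, hsum, hget⟩
      cases i with
      | zero =>
        have hS : cs + x = 0 ∧ PySem.List.pyGet? t (-1) = some x := by
          constructor
          · simpa using hsum
          · simpa using hget
        simp only [Zcnt, if_pos hS]
        omega
      | succ j =>
        have hj : j < r.length := by simpa using hi
        have : Zcnt t (cs + x) r ≠ 0 := by
          apply hih.mpr
          refine ⟨j, hj, ?_, ?_⟩
          · simp only [List.take_succ_cons, List.sum_cons] at hsum
            omega
          · simpa using hget
        simp only [Zcnt]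
        split <;> omega

theorem D_iff_Zcnt (t : List Int) : D_count t ↔ Zcnt t 0 t ≠ 0 := by
  rw [Zcnt_ne_iff t t 0]
  unfold D_count
  constructor
  · rintro ⟨i, hi, hsum, hget⟩
    have hne : t ≠ [] := by intro h; subst h; simp at hi
    refine ⟨i, hi, by omega, ?_⟩
    rw [PySem.List.pyGet?_neg_one, List.getLast?_eq_getElem?]
    rw [List.getElem?_eq_getElem (by omega)]
    have h1 : t.getD (t.length - 1) 0 = t[t.length - 1] := List.getD_eq_getElem t 0 (by omega)
    rw [← h1, ← hget]
  · rintro ⟨i, hi, hsum, hget⟩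
    refine ⟨i, hi, by omega, ?_⟩
    rw [PySem.List.pyGet?_neg_one, List.getLast?_eq_getElem?] at hget
    rw [List.getElem?_eq_getElem (by omega)] at hget
    have h1 : t.getD (t.length - 1) 0 = t[t.length - 1] := List.getD_eq_getElem t 0 (by omega)
    have := Option.some.inj hget
    rw [h1, ← this]

-- ===== VERDICT (by name: the statement is the Claim_ definition above) =====
theorem count_spec : Claim_unchanged_count := by
  intro t _ hD
  have h := count_eq_alt_add t
  have hz : Zcnt t 0 t = 0 := by
    by_contra hne
    exact hD ((D_iff_Zcnt t).mpr hne)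
  omega

theorem count_changed : Claim_changed_count := by unfold Claim_changed_count; decide

theorem count_tight : Claim_exact_count := by
  intro t _ hD
  have h := count_eq_alt_add t
  have hz := (D_iff_Zcnt t).mp hD
  have := Zcnt_nonneg t t 0
  omega
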